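-- pv_equiv track=rewrite | github.com/JakubMlocek/Introduction_to_Computer_Science | Cwiczenia4/zad18.py | podconajwsumiev2
-- ===== SOURCE A (Python) =====
-- def podconajwsumiev2(T,N):
--     maxsum = 0
--     for k in range(N):
--         for i in range(N):
--             j = i
--             sum_v_t = 0
--             sum_h_t = 0
--             while j < N and j - i <= 10:
--                 sum_v_t += T[j][k]
--                 sum_h_t += T[k][j]
--                 maxsum = max(maxsum, sum_h_t, sum_v_t)
--                 j += 1
--     return maxsum
-- ===== SOURCE B (Python) =====
-- def podconajwsumiev2(T, N):
--     if N <= 0: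
--         return 0
--     rowpref = []
--     colpref = []
--     for k in range(N):
--         rp = [0]
--         cp = [0]
--         for j in range(N):
--             rp.append(rp[-1] + T[k][j])
--             cp.append(cp[-1] + T[j][k])
--         rowpref.append(rp)
--         colpref.append(cp)
--     best = 0
--     for k in range(N):
--         rp = rowpref[k]
--         cp = colpref[k]
--         for i in range(N):
--             for L in range(1, min(11, N - i) + 1):
--                 hs = rp[i + L] - rp[i]
--                 vs = cp[i + L] - cp[i]
--                 if hs > best:
--                     best = hs
--                 if vs > best:
--                     best = vs
--     return best
-- ===== Notes on version B (the rewrite author's own statement) =====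
-- stated objective: alternative
-- what changed: B front-loads row and column prefix-sum tables for the matrix and then computes every segment sum (length 1..11, capped by N) as a prefix difference over (start,length) pairs, instead of A's incremental accumulation inside a while loop over a growing window.
import Mathlib
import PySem

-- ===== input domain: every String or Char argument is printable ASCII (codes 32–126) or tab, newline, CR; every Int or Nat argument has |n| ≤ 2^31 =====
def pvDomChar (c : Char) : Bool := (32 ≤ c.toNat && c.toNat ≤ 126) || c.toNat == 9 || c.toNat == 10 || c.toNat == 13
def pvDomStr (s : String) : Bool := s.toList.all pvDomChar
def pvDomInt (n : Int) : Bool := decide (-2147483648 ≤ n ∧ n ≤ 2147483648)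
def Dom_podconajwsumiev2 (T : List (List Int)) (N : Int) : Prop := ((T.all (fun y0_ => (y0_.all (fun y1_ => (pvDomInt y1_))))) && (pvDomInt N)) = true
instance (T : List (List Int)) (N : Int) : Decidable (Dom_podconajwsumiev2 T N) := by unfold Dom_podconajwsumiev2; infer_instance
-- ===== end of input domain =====

-- B replaces A's incremental while-loop accumulation by precomputed row/column prefix-sum
-- tables queried over (start, length) pairs; objective: alternative (same asymptotic cost).

-- shared helper: Python's T[a][b] (total stand-in; Pre_ keeps every access in range)
def pvGet2 (T : List (List Int)) (a b : Int) : Int :=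
  PySem.List.pyGetD (PySem.List.pyGetD T a []) b 0

-- ===== PORT A =====
-- A's 'while j < N and j - i <= 10' loop
def pvWhileA (T : List (List Int)) (N k i : Int) (j svt sht maxsum : Int) : Int :=
  if h : j < N ∧ j - i ≤ 10 then
    let svt' := svt + pvGet2 T j k
    let sht' := sht + pvGet2 T k j
    pvWhileA T N k i (j + 1) svt' sht' (max (max maxsum sht') svt')
  else maxsum
termination_by (N - j).toNat
decreasing_by omega

def podconajwsumiev2 (T : List (List Int)) (N : Int) : Int :=
  (PySem.List.pyRange 0 N 1).foldl (fun maxsum k =>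
    (PySem.List.pyRange 0 N 1).foldl (fun maxsum i =>
      pvWhileA T N k i i 0 0 maxsum) maxsum) 0

-- ===== PORT B =====
def podconajwsumiev2_alt (T : List (List Int)) (N : Int) : Int :=
  if N ≤ 0 then 0
  else
    -- build rowpref and colpref together, as Source B does
    let tabs := (PySem.List.pyRange 0 N 1).foldl
      (fun (acc : List (List Int) × List (List Int)) k =>
        let rpcp := (PySem.List.pyRange 0 N 1).foldl
          (fun (p : List Int × List Int) j =>
            (p.1 ++ [PySem.List.pyGetD p.1 (-1) 0 + pvGet2 T k j],
             p.2 ++ [PySem.List.pyGetD p.2 (-1) 0 + pvGet2 T j k]))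
          ([0], [0])
        (acc.1 ++ [rpcp.1], acc.2 ++ [rpcp.2]))
      ([], [])
    (PySem.List.pyRange 0 N 1).foldl (fun best k =>
      let rp := PySem.List.pyGetD tabs.1 k []
      let cp := PySem.List.pyGetD tabs.2 k []
      (PySem.List.pyRange 0 N 1).foldl (fun best i =>
        (PySem.List.pyRange 1 (min 11 (N - i) + 1) 1).foldl (fun best L =>
          let hs := PySem.List.pyGetD rp (i + L) 0 - PySem.List.pyGetD rp i 0
          let vs := PySem.List.pyGetD cp (i + L) 0 - PySem.List.pyGetD cp i 0
          let best1 := if hs > best then hs else best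
          if vs > best1 then vs else best1) best) best) 0

-- ===== PRECONDITION & SPEC =====
-- Pre_ excludes exactly the inputs on which Python A raises IndexError:
-- when N > 0, A reads T[x][y] for all 0 ≤ x, y < N, so it needs at least N rows
-- and each of the first N rows needs at least N entries.
def Pre_podconajwsumiev2 (T : List (List Int)) (N : Int) : Prop :=
  0 < N → (N ≤ (T.length : Int) ∧ ∀ r ∈ T.take N.toNat, N ≤ (r.length : Int))
instance (T : List (List Int)) (N : Int) : Decidable (Pre_podconajwsumiev2 T N) := by
  unfold Pre_podconajwsumiev2; infer_instance

def pvWitness_podconajwsumiev2 : List (List Int) × Int := ([[1, -2], [3, 4]], 2)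

def Spec_podconajwsumiev2 (T : List (List Int)) (N : Int) (out : Int) : Prop := out = podconajwsumiev2_alt T N
instance (T : List (List Int)) (N : Int) (out : Int) : Decidable (Spec_podconajwsumiev2 T N out) := by unfold Spec_podconajwsumiev2; infer_instance

-- ===== CLAIM (what is proved, stated in full; the proofs are below) =====
def Claim_equal_podconajwsumiev2 : Prop := ∀ (T : List (List Int)) (N : Int), Dom_podconajwsumiev2 T N → Pre_podconajwsumiev2 T N → Spec_podconajwsumiev2 T N (podconajwsumiev2 T N)

-- ===== LEMMAS AND PROOFS =====

-- segment sum over a line: pvS f a b = f a + f (a+1) + … + f (b-1)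
def pvS (f : Int → Int) (a b : Int) : Int := ((PySem.List.pyRange a b 1).map f).sum

lemma pvS_cons (f : Int → Int) {a b : Int} (h : a < b) :
    pvS f a b = f a + pvS f (a + 1) b := by
  unfold pvS; rw [PySem.List.pyRange_one_cons h]; simp

lemma pvS_snoc (f : Int → Int) {a b : Int} (h : a ≤ b) :
    pvS f a (b + 1) = pvS f a b + f b := by
  unfold pvS; rw [PySem.List.pyRange_one_succ_right h]; simp

lemma pvS_split (f : Int → Int) {a c b : Int} (h1 : a ≤ c) (h2 : c ≤ b) :
    pvS f a b = pvS f a c + pvS f c b := by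
  unfold pvS; rw [PySem.List.pyRange_one_append a c b h1 h2]; simp

lemma pvS_single (f : Int → Int) (a : Int) : pvS f a (a + 1) = f a := by
  unfold pvS; rw [PySem.List.pyRange_one_singleton]; simp

-- A's while loop computes a fold of maxima of window sums anchored at j
lemma pvWhileA_eq (T : List (List Int)) (N k i : Int) (j svt sht m : Int) :
    pvWhileA T N k i j svt sht m =
      (PySem.List.pyRange j (min N (i + 11)) 1).foldl
        (fun m j' => max (max m (sht + pvS (fun t => pvGet2 T k t) j (j' + 1)))
                         (svt + pvS (fun t => pvGet2 T t k) j (j' + 1))) m := by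
  induction j, svt, sht, m using pvWhileA.induct T N k i with
  | case1 j svt sht m h svt' sht' ih =>
    have hs : svt' = svt + pvGet2 T j k := rfl
    have hh : sht' = sht + pvGet2 T k j := rfl
    rw [hs, hh] at ih
    rw [pvWhileA, dif_pos h]
    show pvWhileA T N k i (j + 1) (svt + pvGet2 T j k) (sht + pvGet2 T k j)
        (max (max m (sht + pvGet2 T k j)) (svt + pvGet2 T j k)) = _
    rw [ih]
    rw [PySem.List.pyRange_one_cons (show j < min N (i + 11) by omega)]
    rw [List.foldl_cons]
    rw [PySem.List.foldl_congr_mem' (g := fun m j' =>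
        max (max m (sht + pvS (fun t => pvGet2 T k t) j (j' + 1)))
            (svt + pvS (fun t => pvGet2 T t k) j (j' + 1)))]
    · congr 1
      simp [pvS_single]
    · intro x hx acc
      have hx' : j + 1 ≤ x := (PySem.List.mem_pyRange_one.1 hx).1
      rw [pvS_cons (f := fun t => pvGet2 T k t) (show j < x + 1 by omega),
          pvS_cons (f := fun t => pvGet2 T t k) (show j < x + 1 by omega)]
      ring_nf
  | case2 j svt sht m h =>
    rw [pvWhileA, dif_neg h]
    rw [PySem.List.pyRange_one_eq_nil (by omega)]
    rfl

-- inner prefix builder of B: produces the two prefix-sum tables of one line pair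
lemma pvPrefInner (hf vf : Int → Int) (n : Int) (hn : 0 ≤ n) :
    (PySem.List.pyRange 0 n 1).foldl
      (fun (p : List Int × List Int) j =>
        (p.1 ++ [PySem.List.pyGetD p.1 (-1) 0 + hf j],
         p.2 ++ [PySem.List.pyGetD p.2 (-1) 0 + vf j])) ([0], [0])
    = ((PySem.List.pyRange 0 (n + 1) 1).map (fun t => pvS hf 0 t),
       (PySem.List.pyRange 0 (n + 1) 1).map (fun t => pvS vf 0 t)) := by
  induction n, hn using Int.le_induction with
  | base =>
    rw [PySem.List.pyRange_one_eq_nil le_rfl]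
    rw [show (0:Int) + 1 = 0 + 1 from rfl, PySem.List.pyRange_one_singleton]
    simp [pvS, PySem.List.pyRange_one_eq_nil]
  | succ n hn ih =>
    rw [PySem.List.pyRange_one_succ_right hn, List.foldl_append, ih]
    rw [PySem.List.pyRange_one_succ_right (by omega : (0:Int) ≤ n + 1)]
    simp only [List.foldl_cons, List.foldl_nil, List.map_append, List.map_cons, List.map_nil]
    rw [PySem.List.pyRange_one_succ_right (by omega : (0:Int) ≤ n)]
    simp only [List.map_append, List.map_cons, List.map_nil,
      PySem.List.pyGetD_neg_one_append_singleton]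
    rw [pvS_snoc hf hn, pvS_snoc vf hn]

-- outer builder of B: appending one pair of tables per line
lemma pvPairMap (l : List Int) (F : Int → List Int × List Int) (acc : List (List Int) × List (List Int)) :
    l.foldl (fun acc k => (acc.1 ++ [(F k).1], acc.2 ++ [(F k).2])) acc
      = (acc.1 ++ l.map (fun k => (F k).1), acc.2 ++ l.map (fun k => (F k).2)) := by
  induction l generalizing acc with
  | nil => simp
  | cons x l ih => simp [ih]

lemma pvIfMax (a b : Int) : (if b > a then b else a) = max a b := by
  split_ifs with h <;> omega

-- the window fold of A's while loop equals B's (start,length) prefix-difference fold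
lemma pvAlign (hf vf : Int → Int) (N i b : Int) (hi0 : 0 ≤ i) (hiN : i < N) :
    (PySem.List.pyRange i (min N (i + 11)) 1).foldl
      (fun m j' => max (max m (0 + pvS hf i (j' + 1))) (0 + pvS vf i (j' + 1))) b
    = (PySem.List.pyRange 1 (min 11 (N - i) + 1) 1).foldl
      (fun best L =>
        let hs := PySem.List.pyGetD ((PySem.List.pyRange 0 (N + 1) 1).map (fun t => pvS hf 0 t)) (i + L) 0
                - PySem.List.pyGetD ((PySem.List.pyRange 0 (N + 1) 1).map (fun t => pvS hf 0 t)) i 0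
        let vs := PySem.List.pyGetD ((PySem.List.pyRange 0 (N + 1) 1).map (fun t => pvS vf 0 t)) (i + L) 0
                - PySem.List.pyGetD ((PySem.List.pyRange 0 (N + 1) 1).map (fun t => pvS vf 0 t)) i 0
        let best1 := if hs > best then hs else best
        if vs > best1 then vs else best1) b := by
  rw [PySem.List.pyRange_one i (min N (i + 11)), PySem.List.pyRange_one 1 (min 11 (N - i) + 1)]
  rw [List.foldl_map, List.foldl_map]
  have hlen : (min N (i + 11) - i).toNat = (min 11 (N - i) + 1 - 1).toNat := by omega
  rw [hlen]
  apply PySem.List.foldl_congr_mem'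
  intro t ht acc
  have htc : (t : Int) < min 11 (N - i) := by
    have := List.mem_range.1 ht; omega
  have h1 : PySem.List.pyGetD ((PySem.List.pyRange 0 (N + 1) 1).map (fun t => pvS hf 0 t)) i 0 = pvS hf 0 i :=
    PySem.List.pyGetD_map_pyRange_of_nonneg _ _ _ _ hi0 (by omega)
  have h2 : PySem.List.pyGetD ((PySem.List.pyRange 0 (N + 1) 1).map (fun t => pvS hf 0 t)) (i + (1 + t)) 0
      = pvS hf 0 (i + (1 + t)) :=
    PySem.List.pyGetD_map_pyRange_of_nonneg _ _ _ _ (by omega) (by omega)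
  have h3 : PySem.List.pyGetD ((PySem.List.pyRange 0 (N + 1) 1).map (fun t => pvS vf 0 t)) i 0 = pvS vf 0 i :=
    PySem.List.pyGetD_map_pyRange_of_nonneg _ _ _ _ hi0 (by omega)
  have h4 : PySem.List.pyGetD ((PySem.List.pyRange 0 (N + 1) 1).map (fun t => pvS vf 0 t)) (i + (1 + t)) 0
      = pvS vf 0 (i + (1 + t)) :=
    PySem.List.pyGetD_map_pyRange_of_nonneg _ _ _ _ (by omega) (by omega)
  simp only [h1, h2, h3, h4]
  have hsplit : ∀ f : Int → Int, pvS f 0 (i + (1 + t)) - pvS f 0 i = pvS f i (i + (1 + t)) := by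
    intro f
    rw [pvS_split f hi0 (by omega : i ≤ i + (1 + t))]; ring
  rw [hsplit hf, hsplit vf]
  rw [pvIfMax, pvIfMax]
  have harg : i + (t : Int) + 1 = i + (1 + t) := by ring
  rw [harg]
  ring_nf

-- the two ports agree on every input (the precondition is not needed for the ports,
-- which read out-of-range cells as 0 on both sides; Pre_ marks where Python A returns)
lemma pvMain (T : List (List Int)) (N : Int) : podconajwsumiev2 T N = podconajwsumiev2_alt T N := by
  unfold podconajwsumiev2 podconajwsumiev2_alt
  by_cases hN : N ≤ 0
  · rw [if_pos hN, PySem.List.pyRange_one_eq_nil hN]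
    rfl
  · rw [if_neg hN]
    have hN' : (0:Int) < N := by omega
    have hbody : (fun (acc : List (List Int) × List (List Int)) k =>
        let rpcp := (PySem.List.pyRange 0 N 1).foldl
          (fun (p : List Int × List Int) j =>
            (p.1 ++ [PySem.List.pyGetD p.1 (-1) 0 + pvGet2 T k j],
             p.2 ++ [PySem.List.pyGetD p.2 (-1) 0 + pvGet2 T j k]))
          ([0], [0])
        (acc.1 ++ [rpcp.1], acc.2 ++ [rpcp.2]))
      = (fun (acc : List (List Int) × List (List Int)) k =>
         (acc.1 ++ [((PySem.List.pyRange 0 (N + 1) 1).map (fun t => pvS (fun x => pvGet2 T k x) 0 t),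
                     (PySem.List.pyRange 0 (N + 1) 1).map (fun t => pvS (fun x => pvGet2 T x k) 0 t)).1],
          acc.2 ++ [((PySem.List.pyRange 0 (N + 1) 1).map (fun t => pvS (fun x => pvGet2 T k x) 0 t),
                     (PySem.List.pyRange 0 (N + 1) 1).map (fun t => pvS (fun x => pvGet2 T x k) 0 t)).2])) := by
      funext acc k
      simp only [pvPrefInner (fun x => pvGet2 T k x) (fun x => pvGet2 T x k) N (le_of_lt hN')]
    rw [hbody, pvPairMap]
    simp only [List.nil_append]
    apply PySem.List.foldl_congr_mem'
    intro k hk best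
    have hk' := PySem.List.mem_pyRange_one.1 hk
    have hrp : PySem.List.pyGetD ((PySem.List.pyRange 0 N 1).map
        (fun k => (PySem.List.pyRange 0 (N + 1) 1).map (fun t => pvS (fun x => pvGet2 T k x) 0 t))) k []
        = (PySem.List.pyRange 0 (N + 1) 1).map (fun t => pvS (fun x => pvGet2 T k x) 0 t) :=
      PySem.List.pyGetD_map_pyRange_of_nonneg _ _ _ _ hk'.1 hk'.2
    have hcp : PySem.List.pyGetD ((PySem.List.pyRange 0 N 1).map
        (fun k => (PySem.List.pyRange 0 (N + 1) 1).map (fun t => pvS (fun x => pvGet2 T x k) 0 t))) k []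
        = (PySem.List.pyRange 0 (N + 1) 1).map (fun t => pvS (fun x => pvGet2 T x k) 0 t) :=
      PySem.List.pyGetD_map_pyRange_of_nonneg _ _ _ _ hk'.1 hk'.2
    simp only [hrp, hcp]
    apply PySem.List.foldl_congr_mem'
    intro i hi acc
    have hi' := PySem.List.mem_pyRange_one.1 hi
    rw [pvWhileA_eq]
    exact pvAlign (fun x => pvGet2 T k x) (fun x => pvGet2 T x k) N i acc hi'.1 hi'.2

-- ===== VERDICT (by name: the statement is the Claim_ definition above) =====
theorem podconajwsumiev2_spec : Claim_equal_podconajwsumiev2 := by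
  intro T N _ _
  unfold Spec_podconajwsumiev2
  exact pvMain T N
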